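-- pv_equiv track=rewrite | github.com/Ian-Dzindo01/PoliTo_CS_Projects | Lab 11/Lab11.3/program.py | sparseArraySum
-- ===== SOURCE A (Python) =====
-- def sparseArraySum(d1,d2):
--     l = []
--
--     largestd1 = list(d1.keys())[len(d1.keys())-1]
--     largestd2 = list(d2.keys())[len(d2.keys())-1]
--
--     if largestd1 > largestd2:
--         largest = largestd1+1
--     else:
--         largest = largestd2+1
--
--     for i in range(largest):
--         l.append(0)
--         if i in d1:
--             l[i] += d1[i]
--
--         if i in d2:
--             l[i] += d2[i]
--
--
--     return l
-- ===== SOURCE B (Python) =====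
-- def sparseArraySum(d1, d2):
--     largestd1 = list(d1.keys())[len(d1.keys()) - 1]
--     largestd2 = list(d2.keys())[len(d2.keys()) - 1]
--     largest = max(largestd1, largestd2) + 1
--     l = [0] * largest
--     for k, v in d1.items():
--         if 0 <= k < largest:
--             l[k] += v
--     for k, v in d2.items():
--         if 0 <= k < largest:
--             l[k] += v
--     return l
-- ===== Notes on version B (the rewrite author's own statement) =====
-- stated objective: alternative
-- what changed: B preallocates the dense zero list with [0]*largest and makes one pass over each dict's items (adding in-range entries into place), instead of A's per-index loop over range(largest) that appends and does two dict-membership tests and lookups at every index.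
import Mathlib
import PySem

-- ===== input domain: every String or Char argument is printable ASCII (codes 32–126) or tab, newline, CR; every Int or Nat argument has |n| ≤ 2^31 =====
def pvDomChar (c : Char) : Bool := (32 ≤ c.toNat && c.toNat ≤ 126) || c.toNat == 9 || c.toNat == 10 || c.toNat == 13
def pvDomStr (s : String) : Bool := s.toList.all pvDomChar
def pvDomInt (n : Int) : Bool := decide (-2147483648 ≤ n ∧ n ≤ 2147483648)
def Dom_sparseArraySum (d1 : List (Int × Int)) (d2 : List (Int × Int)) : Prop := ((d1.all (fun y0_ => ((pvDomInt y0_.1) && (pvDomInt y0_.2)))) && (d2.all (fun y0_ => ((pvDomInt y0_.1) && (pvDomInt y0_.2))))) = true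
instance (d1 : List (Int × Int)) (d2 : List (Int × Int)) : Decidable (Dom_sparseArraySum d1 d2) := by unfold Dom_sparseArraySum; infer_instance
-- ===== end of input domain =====

-- B replaces A's scan of every dense index (with two membership tests per index) by a
-- preallocated zero list plus one pass over each dict's items; return-value equivalence only.

-- ===== PORT A =====
def sparseArraySum (d1 : List (Int × Int)) (d2 : List (Int × Int)) : List Int :=
  match PySem.List.pyGet? (PySem.Dict.ofList d1).keys (((PySem.Dict.ofList d1 : PySem.Dict Int Int).keys.length : Int) - 1),
        PySem.List.pyGet? (PySem.Dict.ofList d2).keys (((PySem.Dict.ofList d2 : PySem.Dict Int Int).keys.length : Int) - 1) with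
  | some la, some lb =>
      (PySem.List.pyRange 0 (if la > lb then la + 1 else lb + 1) 1).foldl (fun l i =>
        let l1 := l ++ [(0 : Int)]
        let l2 := if (PySem.Dict.ofList d1).contains i then
            PySem.List.pySetD l1 i (PySem.List.pyGetD l1 i 0 + (PySem.Dict.ofList d1).getD i 0) else l1
        if (PySem.Dict.ofList d2).contains i then
            PySem.List.pySetD l2 i (PySem.List.pyGetD l2 i 0 + (PySem.Dict.ofList d2).getD i 0) else l2) []
  | _, _ => []  -- IndexError in Python: excluded by Pre_

-- ===== PORT B =====
def pvAddEntries (largest : Int) (items : List (Int × Int)) (l : List Int) : List Int :=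
  items.foldl (fun l kv =>
    if 0 ≤ kv.1 ∧ kv.1 < largest then
      l.set kv.1.toNat (l.getD kv.1.toNat 0 + kv.2) else l) l

def sparseArraySum_alt (d1 : List (Int × Int)) (d2 : List (Int × Int)) : List Int :=
  match PySem.List.pyGet? (PySem.Dict.ofList d1).keys (((PySem.Dict.ofList d1 : PySem.Dict Int Int).keys.length : Int) - 1) with
  | none => []  -- IndexError in Python: excluded by Pre_
  | some la =>
    match PySem.List.pyGet? (PySem.Dict.ofList d2).keys (((PySem.Dict.ofList d2 : PySem.Dict Int Int).keys.length : Int) - 1) with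
    | none => []  -- IndexError in Python: excluded by Pre_
    | some lb =>
        pvAddEntries (max la lb + 1) (PySem.Dict.ofList d2).items
          (pvAddEntries (max la lb + 1) (PySem.Dict.ofList d1).items
            (List.replicate (max la lb + 1).toNat 0))

-- ===== PRECONDITION & SPEC =====
-- Pre_ excludes empty dicts, on which the Python A (and B) raise IndexError.
def Pre_sparseArraySum (d1 : List (Int × Int)) (d2 : List (Int × Int)) : Prop :=
  d1 ≠ [] ∧ d2 ≠ []
instance (d1 : List (Int × Int)) (d2 : List (Int × Int)) : Decidable (Pre_sparseArraySum d1 d2) := by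
  unfold Pre_sparseArraySum; infer_instance

def pvWitness_sparseArraySum : (List (Int × Int)) × (List (Int × Int)) :=
  ([(0, 1), (2, 3)], [(1, 5)])

def Spec_sparseArraySum (d1 : List (Int × Int)) (d2 : List (Int × Int)) (out : List Int) : Prop := out = sparseArraySum_alt d1 d2
instance (d1 : List (Int × Int)) (d2 : List (Int × Int)) (out : List Int) : Decidable (Spec_sparseArraySum d1 d2 out) := by unfold Spec_sparseArraySum; infer_instance

-- ===== CLAIM (what is proved, stated in full; the proofs are below) =====
def Claim_equal_sparseArraySum : Prop := ∀ (d1 : List (Int × Int)) (d2 : List (Int × Int)), Dom_sparseArraySum d1 d2 → Pre_sparseArraySum d1 d2 → Spec_sparseArraySum d1 d2 (sparseArraySum d1 d2)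

-- ===== LEMMAS AND PROOFS =====

theorem pv_set_append_last (acc : List Int) (b x : Int) :
    (acc ++ [b]).set acc.length x = acc ++ [x] := by
  induction acc with
  | nil => rfl
  | cons a t ih => simp [ih]

theorem pv_getD_append_last (acc : List Int) (b : Int) :
    (acc ++ [b]).getD acc.length 0 = b := by
  induction acc with
  | nil => rfl
  | cons a t ih => simp [ih]

-- one body of A's loop, at the invariant index i = acc.length, produces acc ++ [D1.getD i 0 + D2.getD i 0]
theorem pv_stepA (D1 D2 : PySem.Dict Int Int) (acc : List Int) :
    (fun l (i : Int) =>
        let l1 := l ++ [(0 : Int)]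
        let l2 := if D1.contains i then
            PySem.List.pySetD l1 i (PySem.List.pyGetD l1 i 0 + D1.getD i 0) else l1
        if D2.contains i then
            PySem.List.pySetD l2 i (PySem.List.pyGetD l2 i 0 + D2.getD i 0) else l2)
      acc (acc.length : Int)
    = acc ++ [D1.getD (acc.length : Int) 0 + D2.getD (acc.length : Int) 0] := by
  simp only [PySem.List.pySetD_natCast, PySem.List.pyGetD_natCast]
  have h1 : (acc ++ [(0 : Int)]).getD acc.length 0 = 0 := pv_getD_append_last acc 0
  have z1 : D1.contains (acc.length : Int) = false → D1.getD (acc.length : Int) 0 = 0 :=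
    fun h => PySem.Dict.getD_of_not_contains D1 0 h
  have z2 : D2.contains (acc.length : Int) = false → D2.getD (acc.length : Int) 0 = 0 :=
    fun h => PySem.Dict.getD_of_not_contains D2 0 h
  by_cases hc1 : D1.contains (acc.length : Int) <;>
    by_cases hc2 : D2.contains (acc.length : Int)
  · simp [hc1, hc2, h1, pv_set_append_last, pv_getD_append_last]
  · simp [hc1, hc2, h1, pv_set_append_last, pv_getD_append_last, z2 (by simp [hc2])]
  · simp [hc1, hc2, h1, pv_set_append_last, pv_getD_append_last, z1 (by simp [hc1])]
  · simp [hc1, hc2, z1 (by simp [hc1]), z2 (by simp [hc2])]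

theorem pv_loopA (D1 D2 : PySem.Dict Int Int) (n : Nat) :
    ((List.range n).map (fun k : Nat => (k : Int))).foldl
      (fun l (i : Int) =>
        let l1 := l ++ [(0 : Int)]
        let l2 := if D1.contains i then
            PySem.List.pySetD l1 i (PySem.List.pyGetD l1 i 0 + D1.getD i 0) else l1
        if D2.contains i then
            PySem.List.pySetD l2 i (PySem.List.pyGetD l2 i 0 + D2.getD i 0) else l2) []
    = (List.range n).map (fun k : Nat => D1.getD (k : Int) 0 + D2.getD (k : Int) 0) := by
  induction n with
  | zero => rfl
  | succ m ih =>
      rw [List.range_succ, List.map_append, List.foldl_append, ih, List.map_append]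
      have := pv_stepA D1 D2
        ((List.range m).map (fun k : Nat => D1.getD (k : Int) 0 + D2.getD (k : Int) 0))
      simpa using this

theorem pv_getD_set_same (l : List Int) (j : Nat) (x : Int) (h : j < l.length) :
    (l.set j x).getD j 0 = x := by
  simp [List.getD_eq_getElem?_getD, h]

theorem pv_getD_set_ne (l : List Int) (i j : Nat) (x : Int) (h : i ≠ j) :
    (l.set i x).getD j 0 = l.getD j 0 := by
  simp [List.getD_eq_getElem?_getD, h]

theorem pv_addEntries_length (L : Int) (items : List (Int × Int)) (l : List Int) :
    (pvAddEntries L items l).length = l.length := by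
  induction items generalizing l with
  | nil => rfl
  | cons kv rest ih =>
      simp only [pvAddEntries, List.foldl_cons] at ih ⊢
      split_ifs with h
      · rw [ih, List.length_set]
      · exact ih l

theorem pv_addEntries_getD (L : Int) (items : List (Int × Int)) (l : List Int)
    (j : Nat) (hj : j < l.length) (hlen : l.length = L.toNat) :
    (pvAddEntries L items l).getD j 0
      = l.getD j 0 + ((items.filter (fun p => p.1 == (j : Int))).map (·.2)).sum := by
  induction items generalizing l with
  | nil => simp [pvAddEntries]
  | cons kv rest ih =>
      obtain ⟨k, v⟩ := kv
      simp only [pvAddEntries, List.foldl_cons] at ih ⊢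
      rw [List.filter_cons]
      by_cases hin : 0 ≤ k ∧ k < L
      · rw [if_pos hin]
        have h1 := ih (l.set k.toNat (l.getD k.toNat 0 + v))
          (by rw [List.length_set]; exact hj) (by rw [List.length_set]; exact hlen)
        rw [h1]
        by_cases hk : k = (j : Int)
        · have hkj : k.toNat = j := by omega
          have hbeq : ((k, v).1 == (j : Int)) = true := by simpa using hk
          rw [hbeq, hkj, pv_getD_set_same l j _ hj]
          simp [add_assoc]
        · have hkj : k.toNat ≠ j := by omega
          have hbeq : ((k, v).1 == (j : Int)) = false := by simpa using hk
          rw [hbeq, pv_getD_set_ne l k.toNat j _ hkj]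
          simp
      · rw [if_neg hin]
        have hk : ((k, v).1 == (j : Int)) = false := by
          simp only [beq_eq_false_iff_ne, ne_eq]
          intro h; omega
        rw [hk, ih l hj hlen]
        simp

-- with nodup keys, the filtered-sum over the items IS the dict lookup with default 0
theorem pv_sum_filter_eq_getD (items : List (Int × Int)) (x : Int)
    (hnd : (items.map Prod.fst).Nodup) :
    ((items.filter (fun p => p.1 == x)).map (·.2)).sum
      = (PySem.Dict.mk items).getD x 0 := by
  induction items with
  | nil => simp [PySem.Dict.getD, PySem.Dict.get?]
  | cons kv rest ih =>
      obtain ⟨k, v⟩ := kv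
      simp only [List.map_cons, List.nodup_cons] at hnd
      rw [List.filter_cons]
      by_cases hk : k = x
      · subst hk
        have hrest : rest.filter (fun p => p.1 == k) = [] := by
          apply List.filter_eq_nil_iff.mpr
          intro p hp
          simp only [beq_iff_eq]
          intro h
          exact hnd.1 (h ▸ (List.mem_map_of_mem hp))
        simp [hrest, PySem.Dict.getD_eq_get?_getD, PySem.Dict.get?_mk_cons]
      · have hbeq : ((k, v).1 == x) = false := by simpa using hk
        rw [hbeq]
        simp only [Bool.false_eq_true, if_false]
        rw [ih hnd.2]
        simp [PySem.Dict.getD_eq_get?_getD, PySem.Dict.get?_mk_cons, hk]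

theorem pv_mk_items (d : PySem.Dict Int Int) : PySem.Dict.mk d.items = d := rfl

theorem pv_main (d1 d2 : List (Int × Int)) :
    sparseArraySum d1 d2 = sparseArraySum_alt d1 d2 := by
  unfold sparseArraySum sparseArraySum_alt
  set D1 := PySem.Dict.ofList d1 with hD1
  set D2 := PySem.Dict.ofList d2 with hD2
  set o1 := PySem.List.pyGet? D1.keys ((D1.keys.length : Int) - 1) with ho1
  set o2 := PySem.List.pyGet? D2.keys ((D2.keys.length : Int) - 1) with ho2
  cases o1 with
  | none => rfl
  | some la =>
    cases o2 with
    | none => rfl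
    | some lb =>
      simp only
      have hlg : (if la > lb then la + 1 else lb + 1) = max la lb + 1 := by
        split_ifs <;> omega
      rw [hlg]
      set L := max la lb + 1 with hL
      -- A's side: the loop is a map over the range
      have hrange : PySem.List.pyRange 0 L 1
          = (List.range L.toNat).map (fun k : Nat => (k : Int)) := by
        rw [PySem.List.pyRange_one]
        simp
      rw [hrange, pv_loopA]
      -- elementwise comparison
      have hnd1 : (D1.items.map Prod.fst).Nodup := PySem.Dict.nodup_keys_ofList d1
      have hnd2 : (D2.items.map Prod.fst).Nodup := PySem.Dict.nodup_keys_ofList d2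
      have hlen1 : (pvAddEntries L D1.items (List.replicate L.toNat 0)).length = L.toNat := by
        rw [pv_addEntries_length]; simp
      have hlenB : (pvAddEntries L D2.items
          (pvAddEntries L D1.items (List.replicate L.toNat 0))).length = L.toNat := by
        rw [pv_addEntries_length, hlen1]
      apply List.ext_getElem
      · simp [hlenB]
      · intro j hjA hjB
        have hj : j < L.toNat := by simpa [hlenB] using hjB
        have hA : ((List.range L.toNat).map
            (fun k : Nat => D1.getD (k : Int) 0 + D2.getD (k : Int) 0))[j]'hjA =
            D1.getD (j : Int) 0 + D2.getD (j : Int) 0 := by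
          simp
        rw [hA]
        have hgB : (pvAddEntries L D2.items
            (pvAddEntries L D1.items (List.replicate L.toNat 0))).getD j 0
            = D1.getD (j : Int) 0 + D2.getD (j : Int) 0 := by
          rw [pv_addEntries_getD L D2.items _ j (by rw [hlen1]; exact hj) hlen1,
            pv_addEntries_getD L D1.items _ j (by simpa using hj) (by simp)]
          rw [pv_sum_filter_eq_getD D1.items _ hnd1, pv_sum_filter_eq_getD D2.items _ hnd2]
          simp [pv_mk_items, add_assoc]
        rw [← hgB]
        exact List.getD_eq_getElem _ _ hjB

-- ===== VERDICT (by name: the statement is the Claim_ definition above) =====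
theorem sparseArraySum_spec : Claim_equal_sparseArraySum := by
  intro d1 d2 _ _
  unfold Spec_sparseArraySum
  exact pv_main d1 d2
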